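-- pv_equiv track=rewrite | github.com/shivaansh81001/Kattis_solutions | kattis_solutions/piano.py | solve
-- ===== SOURCE A (Python) =====
-- def min_pop(times):
--     if not times:
--         return None
--     else:
--         smallest_value=min(times)
--         smallest_index=times.index(smallest_value)
--         return times.pop(smallest_index)
--
-- def solve(m,p,skip,moves):
--     ans,i=0,1
--     times=[]
--     l=len(moves)
--     while i<101:
--         while ans<l and moves[ans][0] <= i:
--             times.append(moves[ans][1])
--             ans=ans+1
--         if (i%7) in skip:
--             pass
--         else:
--             j=0
--             while j<int(p/2):
--                 if times:
--                     pass
--                 else: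
--                     break
--                 min_pop(times)
--                 j+=1
--         if not times and ans==l:
--             break
--         if times and min(times)<=i:
--             return False
--         i+=1
--     return True
-- ===== SOURCE B (Python) =====
-- def solve(m, p, skip, moves):
--     cnt = int(p / 2)
--     idx, l = 0, len(moves)
--     pending = []  # deadlines, kept sorted ascending
--     for i in range(1, 101):
--         while idx < l and moves[idx][0] <= i:
--             d = moves[idx][1]
--             # insert d keeping pending sorted
--             k = 0
--             while k < len(pending) and pending[k] <= d:
--                 k += 1
--             pending.insert(k, d)
--             idx += 1
--         if (i % 7) not in skip:
--             if cnt > 0: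
--                 del pending[:cnt]
--         if not pending and idx == l:
--             return True
--         if pending and pending[0] <= i:
--             return False
--     return True
-- ===== Notes on version B (the rewrite author's own statement) =====
-- stated objective: alternative
-- what changed: B keeps the pending deadlines in one sorted list (insertion at the sorted position), so serving int(p/2) keys per step is a single slice deletion and the deadline check reads the head, instead of A's per-pop min()+index()+pop() scans.
import Mathlib
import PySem

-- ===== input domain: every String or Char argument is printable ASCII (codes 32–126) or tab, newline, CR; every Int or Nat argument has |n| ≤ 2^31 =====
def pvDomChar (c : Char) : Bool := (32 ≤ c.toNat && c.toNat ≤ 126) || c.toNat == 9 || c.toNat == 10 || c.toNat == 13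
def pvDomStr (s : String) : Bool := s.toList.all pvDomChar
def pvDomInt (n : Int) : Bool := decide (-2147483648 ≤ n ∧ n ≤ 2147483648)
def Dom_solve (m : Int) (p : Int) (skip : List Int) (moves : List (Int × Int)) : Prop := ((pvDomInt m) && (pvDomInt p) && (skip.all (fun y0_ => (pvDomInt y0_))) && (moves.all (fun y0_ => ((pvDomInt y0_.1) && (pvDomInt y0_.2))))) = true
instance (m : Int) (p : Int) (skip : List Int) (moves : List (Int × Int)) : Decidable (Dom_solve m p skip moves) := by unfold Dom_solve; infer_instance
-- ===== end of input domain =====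

-- B replaces A's per-pop min/index/pop scans by a pending list kept sorted in one place,
-- so serving int(p/2) keys is one slice deletion and the feasibility test reads the head.

-- ===== PORT A =====

-- min_pop(times): min, .index, .pop (list mutation rendered as returning the new list)
def minPopA (ts : List Int) : List Int :=
  match PySem.List.min? ts (fun x => x) with
  | none => ts
  | some v =>
    match PySem.List.index? ts v with
    | none => ts
    | some idx =>
      match PySem.List.pop? ts (idx : Int) with
      | none => ts
      | some (_, rest) => rest

-- inner while: j < int(p/2), break when times is empty, min_pop each step
def serveA : Nat → List Int → List Int
  | 0, ts => ts
  | k + 1, ts => if ts.isEmpty then ts else serveA k (minPopA ts)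

-- inner while: consume moves[ans] while its press time ≤ i, appending the deadline
def consumeA (i : Int) : List (Int × Int) → List Int → List (Int × Int) × List Int
  | [], ts => ([], ts)
  | (t, d) :: rest, ts =>
    if t ≤ i then consumeA i rest (ts ++ [d]) else ((t, d) :: rest, ts)

-- outer while i < 101; fuel counts the remaining iterations
def loopA (p : Int) (skip : List Int) : Nat → Int → List (Int × Int) → List Int → Bool
  | 0, _, _, _ => true
  | f + 1, i, rem, ts =>
    match consumeA i rem ts with
    | (rem', ts') =>
      let ts2 := if PySem.Int.mod i 7 ∈ skip then ts' else serveA (Int.tdiv p 2).toNat ts'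
      if ts2.isEmpty && rem'.isEmpty then true
      else
        match PySem.List.min? ts2 (fun x => x) with
        | some v => if v ≤ i then false else loopA p skip f (i + 1) rem' ts2
        | none => loopA p skip f (i + 1) rem' ts2

def solve (m : Int) (p : Int) (skip : List Int) (moves : List (Int × Int)) : Bool :=
  loopA p skip 100 1 moves []

-- ===== PORT B =====

-- Source B's insertion: scan past the elements ≤ d, put d there
def insSorted (d : Int) : List Int → List Int
  | [] => [d]
  | x :: xs => if x ≤ d then x :: insSorted d xs else d :: x :: xs

def consumeB (i : Int) : List (Int × Int) → List Int → List (Int × Int) × List Int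
  | [], pd => ([], pd)
  | (t, d) :: rest, pd =>
    if t ≤ i then consumeB i rest (insSorted d pd) else ((t, d) :: rest, pd)

def loopB (cnt : Int) (skip : List Int) : Nat → Int → List (Int × Int) → List Int → Bool
  | 0, _, _, _ => true
  | f + 1, i, rem, pd =>
    match consumeB i rem pd with
    | (rem', pd') =>
      let pd2 := if PySem.Int.mod i 7 ∈ skip then pd'
                 else if cnt > 0 then pd'.drop cnt.toNat else pd'
      if pd2.isEmpty && rem'.isEmpty then true
      else
        match pd2 with
        | d :: t => if d ≤ i then false else loopB cnt skip f (i + 1) rem' (d :: t)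
        | [] => loopB cnt skip f (i + 1) rem' []

def solve_alt (m : Int) (p : Int) (skip : List Int) (moves : List (Int × Int)) : Bool :=
  loopB (Int.tdiv p 2) skip 100 1 moves []

-- ===== PRECONDITION & SPEC =====
def Spec_solve (m : Int) (p : Int) (skip : List Int) (moves : List (Int × Int)) (out : Bool) : Prop := out = solve_alt m p skip moves
instance (m : Int) (p : Int) (skip : List Int) (moves : List (Int × Int)) (out : Bool) : Decidable (Spec_solve m p skip moves out) := by unfold Spec_solve; infer_instance

-- ===== CLAIM (what is proved, stated in full; the proofs are below) =====
def Claim_equal_solve : Prop := ∀ (m : Int) (p : Int) (skip : List Int) (moves : List (Int × Int)), Dom_solve m p skip moves → Spec_solve m p skip moves (solve m p skip moves)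

-- ===== LEMMAS AND PROOFS =====

theorem idxOf?_of_mem (l : List Int) (a : Int) (h : a ∈ l) : l.idxOf? a = some (l.idxOf a) := by
  induction l with
  | nil => simp at h
  | cons x xs ih =>
    by_cases hx : x = a
    · subst hx; simp [List.idxOf?_cons]
    · simp only [List.idxOf?_cons, List.idxOf_cons, beq_iff_eq, hx, if_false, Bool.cond_eq_ite]
      rw [ih ((List.mem_cons.mp h).resolve_left (fun he => hx he.symm))]
      simp

theorem insSorted_perm (d : Int) (pd : List Int) : (insSorted d pd).Perm (d :: pd) := by
  induction pd with
  | nil => simp [insSorted]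
  | cons x xs ih =>
    simp only [insSorted]
    split
    · exact (ih.cons x).trans (List.Perm.swap d x xs)
    · exact List.Perm.refl _

theorem insSorted_sorted (d : Int) (pd : List Int) (h : pd.Pairwise (· ≤ ·)) :
    (insSorted d pd).Pairwise (· ≤ ·) := by
  induction pd with
  | nil => simp [insSorted]
  | cons x xs ih =>
    rcases List.pairwise_cons.mp h with ⟨hx, hxs⟩
    simp only [insSorted]
    split
    case isTrue hxd =>
      refine List.pairwise_cons.mpr ⟨?_, ih hxs⟩
      intro y hy
      rcases List.mem_cons.mp ((insSorted_perm d xs).mem_iff.mp hy) with rfl | hy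
      · exact hxd
      · exact hx y hy
    case isFalse hxd =>
      refine List.pairwise_cons.mpr ⟨?_, h⟩
      intro y hy
      rcases List.mem_cons.mp hy with rfl | hy
      · omega
      · exact le_trans (by omega) (hx y hy)

theorem minPopA_eq_erase (ts : List Int) (v : Int)
    (hv : PySem.List.min? ts (fun x => x) = some v) : minPopA ts = ts.erase v := by
  have hmem : v ∈ ts := PySem.List.min?_mem hv
  have hlt : ts.idxOf v < ts.length := List.idxOf_lt_length_of_mem hmem
  unfold minPopA
  rw [hv]
  simp only [PySem.List.index?_eq_idxOf?, idxOf?_of_mem ts v hmem,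
    PySem.List.pop?_natCast ts _ hlt, List.eraseIdx_idxOf_eq_erase]

theorem perm_isEmpty_eq (ts pd : List Int) (h : ts.Perm pd) : ts.isEmpty = pd.isEmpty := by
  have := h.length_eq
  cases ts <;> cases pd <;> simp_all

-- the first minimum A pops is the head of B's sorted permutation
theorem min?_of_sorted_perm (ts : List Int) (d : Int) (t : List Int)
    (hp : ts.Perm (d :: t)) (hs : (d :: t).Pairwise (· ≤ ·)) :
    PySem.List.min? ts (fun x => x) = some d := by
  cases hmin : PySem.List.min? ts (fun x => x) with
  | none =>
    have h0 := (PySem.List.min?_eq_none_iff ts (fun x => x)).mp hmin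
    subst h0
    exact absurd hp.length_eq (by simp)
  | some v =>
    have hvmem : v ∈ ts := PySem.List.min?_mem hmin
    have hmin' := PySem.List.min?_isMin hmin
    have h1 : v ≤ d := hmin' d (hp.mem_iff.mpr (List.mem_cons_self))
    have h2 : d ≤ v := by
      rcases List.mem_cons.mp (hp.mem_iff.mp hvmem) with rfl | hv'
      · omega
      · exact (List.pairwise_cons.mp hs).1 v hv'
    rw [le_antisymm h1 h2]

theorem minPopA_perm_tail (ts : List Int) (d : Int) (t : List Int)
    (hp : ts.Perm (d :: t)) (hs : (d :: t).Pairwise (· ≤ ·)) :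
    (minPopA ts).Perm t := by
  rw [minPopA_eq_erase ts d (min?_of_sorted_perm ts d t hp hs)]
  simpa [List.erase_cons_head] using hp.erase d

theorem serveA_perm_drop (k : Nat) (ts pd : List Int)
    (hp : ts.Perm pd) (hs : pd.Pairwise (· ≤ ·)) :
    (serveA k ts).Perm (pd.drop k) := by
  induction k generalizing ts pd with
  | zero => simpa [serveA] using hp
  | succ k ih =>
    simp only [serveA]
    by_cases he : ts.isEmpty
    · have hts : ts = [] := List.isEmpty_iff.mp he
      subst hts
      have hpd : pd = [] := by have := hp.length_eq; cases pd <;> simp_all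
      simp [hpd, he]
    · rw [if_neg he]
      cases pd with
      | nil => exact absurd (by have := hp.length_eq; cases ts <;> simp_all) he
      | cons d t =>
        simpa using ih (minPopA ts) t (minPopA_perm_tail ts d t hp hs)
          (List.pairwise_cons.mp hs).2

theorem consume_rel (i : Int) (rem : List (Int × Int)) (ts pd : List Int)
    (hp : ts.Perm pd) (hs : pd.Pairwise (· ≤ ·)) :
    (consumeA i rem ts).1 = (consumeB i rem pd).1 ∧
    (consumeA i rem ts).2.Perm (consumeB i rem pd).2 ∧
    (consumeB i rem pd).2.Pairwise (· ≤ ·) := by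
  induction rem generalizing ts pd with
  | nil => exact ⟨rfl, hp, hs⟩
  | cons md rest ih =>
    obtain ⟨t, d⟩ := md
    simp only [consumeA, consumeB]
    split
    · exact ih (ts ++ [d]) (insSorted d pd)
        ((List.perm_append_singleton d ts).trans ((hp.cons d).trans (insSorted_perm d pd).symm))
        (insSorted_sorted d pd hs)
    · exact ⟨rfl, hp, hs⟩

theorem loop_eq (p : Int) (skip : List Int) (f : Nat) (i : Int)
    (rem : List (Int × Int)) (ts pd : List Int)
    (hp : ts.Perm pd) (hs : pd.Pairwise (· ≤ ·)) :
    loopA p skip f i rem ts = loopB (Int.tdiv p 2) skip f i rem pd := by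
  induction f generalizing i rem ts pd with
  | zero => rfl
  | succ f ih =>
    obtain ⟨hrem, hcp, hcs⟩ := consume_rel i rem ts pd hp hs
    rcases hA : consumeA i rem ts with ⟨remA, tsA⟩
    rcases hB : consumeB i rem pd with ⟨remB, pdB⟩
    rw [hA, hB] at hrem hcp
    rw [hB] at hcs
    simp only at hrem hcp hcs
    subst hrem
    simp only [loopA, loopB, hA, hB]
    -- state after the serving step on each side
    have hps : (if PySem.Int.mod i 7 ∈ skip then tsA else serveA (Int.tdiv p 2).toNat tsA).Perm
        (if PySem.Int.mod i 7 ∈ skip then pdB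
         else if Int.tdiv p 2 > 0 then pdB.drop (Int.tdiv p 2).toNat else pdB) := by
      by_cases hsk : PySem.Int.mod i 7 ∈ skip
      · rw [if_pos hsk, if_pos hsk]; exact hcp
      · rw [if_neg hsk, if_neg hsk]
        by_cases hc : Int.tdiv p 2 > 0
        · rw [if_pos hc]; exact serveA_perm_drop _ _ _ hcp hcs
        · rw [if_neg hc, Int.toNat_of_nonpos (by omega)]
          exact hcp
    have hss : (if PySem.Int.mod i 7 ∈ skip then pdB
        else if Int.tdiv p 2 > 0 then pdB.drop (Int.tdiv p 2).toNat else pdB).Pairwise (· ≤ ·) := by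
      split
      · exact hcs
      · split
        · exact List.Pairwise.sublist (List.drop_sublist _ _) hcs
        · exact hcs
    set tsS := if PySem.Int.mod i 7 ∈ skip then tsA else serveA (Int.tdiv p 2).toNat tsA with htsS
    set pdS := if PySem.Int.mod i 7 ∈ skip then pdB
        else if Int.tdiv p 2 > 0 then pdB.drop (Int.tdiv p 2).toNat else pdB with hpdS
    rw [perm_isEmpty_eq tsS pdS hps]
    by_cases h1 : (pdS.isEmpty && remA.isEmpty) = true
    · rw [if_pos h1, if_pos h1]
    · rw [if_neg h1, if_neg h1]
      cases hcase : pdS with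
      | nil =>
        have h2 : tsS = [] := by
          have := hps.length_eq; rw [hcase] at this; cases htsS' : tsS <;> simp_all
        rw [h2, show PySem.List.min? ([] : List Int) (fun x => x) = none from rfl]
        dsimp only
        exact ih (i + 1) remA [] [] (List.Perm.refl _) (by simp)
      | cons d t =>
        rw [min?_of_sorted_perm tsS d t (hcase ▸ hps) (hcase ▸ hss)]
        dsimp only
        by_cases hd : d ≤ i
        · rw [if_pos hd, if_pos hd]
        · rw [if_neg hd, if_neg hd]
          exact ih (i + 1) remA tsS (d :: t) (hcase ▸ hps) (hcase ▸ hss)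

-- ===== VERDICT (by name: the statement is the Claim_ definition above) =====
theorem solve_spec : Claim_equal_solve := by
  intro m p skip moves _
  unfold Spec_solve solve solve_alt
  exact loop_eq p skip 100 1 moves [] [] (List.Perm.refl _) (by simp)
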